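-- pv_equiv track=rewrite | github.com/NKH-92/HL-Mail_helper | app/ai/classification_engine.py | _normalize_legacy_action_types
-- ===== SOURCE A (Python) =====
-- def _normalize_legacy_action_types(value: list[str]) -> list[str]:
--     mapping = {
--         "REPLY": "reply",
--         "REVIEW": "review",
--         "APPROVE": "approve",
--         "SUBMIT": "submit",
--         "MODIFY": "prepare",
--         "SCHEDULE": "attend",
--         "FOLLOW_UP": "monitor",
--         "DECIDE": "review",
--         "NONE": "none",
--     }
--     normalized: list[str] = []
--     for item in value:
--         mapped = mapping.get(item)
--         if mapped and mapped not in normalized: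
--             normalized.append(mapped)
--     return normalized or ["none"]
-- ===== SOURCE B (Python) =====
-- def _normalize_legacy_action_types(value: list[str]) -> list[str]:
--     mapping = {
--         "REPLY": "reply",
--         "REVIEW": "review",
--         "APPROVE": "approve",
--         "SUBMIT": "submit",
--         "MODIFY": "prepare",
--         "SCHEDULE": "attend",
--         "FOLLOW_UP": "monitor",
--         "DECIDE": "review",
--         "NONE": "none",
--     }
--     # Class-elimination: take the head's mapped class, then delete every later
--     # element of the same class in one sweep; no membership test on the result
--     # is ever needed, and the loop body runs at most once per class (<= 10 times).
--     result: list[str] = []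
--     remaining = value
--     while remaining:
--         v = mapping.get(remaining[0])
--         remaining = [x for x in remaining[1:] if mapping.get(x) != v]
--         if v is not None:
--             result.append(v)
--     return result or ["none"]
-- ===== Notes on version B (the rewrite author's own statement) =====
-- stated objective: alternative
-- what changed: Replaces A's streaming dedup (one pass appending each mapped value after a 'not in result' scan) with a class-elimination loop: repeatedly map the head, then delete every remaining element of the same mapped class in one sweep, so duplicates never reach the result and the loop body runs at most once per class (about 10 times).
import Mathlib
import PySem

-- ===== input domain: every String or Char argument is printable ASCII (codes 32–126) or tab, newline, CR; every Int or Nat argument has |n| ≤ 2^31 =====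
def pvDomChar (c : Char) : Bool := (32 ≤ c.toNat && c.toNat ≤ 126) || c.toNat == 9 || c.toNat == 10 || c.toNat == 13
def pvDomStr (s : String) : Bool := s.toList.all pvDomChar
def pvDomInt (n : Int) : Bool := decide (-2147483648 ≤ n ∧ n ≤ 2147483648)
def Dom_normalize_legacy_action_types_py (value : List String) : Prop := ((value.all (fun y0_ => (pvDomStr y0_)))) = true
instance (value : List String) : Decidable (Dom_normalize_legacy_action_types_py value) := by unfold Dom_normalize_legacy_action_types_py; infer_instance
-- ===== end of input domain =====

-- B replaces A's streaming membership-scan dedup with a class-elimination loop (same cost; alternative structure).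
-- ===== PORT A =====
-- the legacy mapping dict literal (shared constant of both Python versions)
def legacyMapping : PySem.Dict String String := PySem.Dict.ofList [
  ("REPLY", "reply"), ("REVIEW", "review"), ("APPROVE", "approve"),
  ("SUBMIT", "submit"), ("MODIFY", "prepare"), ("SCHEDULE", "attend"),
  ("FOLLOW_UP", "monitor"), ("DECIDE", "review"), ("NONE", "none")]

-- A's loop body: mapped = mapping.get(item); if mapped and mapped not in normalized: append
def normLoopA (acc : List String) (item : String) : List String :=
  match legacyMapping.get? item with
  | some m => if m ≠ "" ∧ m ∉ acc then acc ++ [m] else acc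
  | none => acc

def normalize_legacy_action_types_py (value : List String) : List String :=
  let normalized := value.foldl normLoopA []
  if normalized = [] then ["none"] else normalized

-- ===== PORT B =====
-- B's while loop: v = mapping.get(remaining[0]); remaining = [x for x in remaining[1:] if mapping.get(x) != v];
-- if v is not None: result.append(v)
def goB (result : List String) : List String → List String
  | [] => result
  | x :: rest =>
    match legacyMapping.get? x with
    | some m => goB (result ++ [m]) (rest.filter (fun y => legacyMapping.get? y ≠ some m))
    | none => goB result (rest.filter (fun y => legacyMapping.get? y ≠ none))
termination_by l => l.length
decreasing_by all_goals exact Nat.lt_succ_of_le (by simpa using List.length_filter_le _ rest.attach)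

def normalize_legacy_action_types_py_alt (value : List String) : List String :=
  let result := goB [] value
  if result = [] then ["none"] else result

-- ===== PRECONDITION & SPEC =====
def Spec_normalize_legacy_action_types_py (value : List String) (out : List String) : Prop := out = normalize_legacy_action_types_py_alt value
instance (value : List String) (out : List String) : Decidable (Spec_normalize_legacy_action_types_py value out) := by unfold Spec_normalize_legacy_action_types_py; infer_instance

-- ===== CLAIM (what is proved, stated in full; the proofs are below) =====
def Claim_equal_normalize_legacy_action_types_py : Prop := ∀ (value : List String), Dom_normalize_legacy_action_types_py value → Spec_normalize_legacy_action_types_py value (normalize_legacy_action_types_py value)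

-- ===== LEMMAS AND PROOFS =====
-- every value of the legacy mapping is a nonempty string (so A's truthiness test on it is always true)
theorem legacyMapping_get?_ne_some_empty (s : String) : legacyMapping.get? s ≠ some "" := by
  rw [show legacyMapping = PySem.Dict.mk [("REPLY", "reply"), ("REVIEW", "review"), ("APPROVE", "approve"),
    ("SUBMIT", "submit"), ("MODIFY", "prepare"), ("SCHEDULE", "attend"),
    ("FOLLOW_UP", "monitor"), ("DECIDE", "review"), ("NONE", "none")] from by decide]
  simp [PySem.Dict.get?_mk_cons]
  split_ifs <;> simp [PySem.Dict.get?]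

-- the elements of l that A (with accumulator acc) would still consider new
def keepB (acc : List String) (y : String) : Bool :=
  match legacyMapping.get? y with
  | some v => !acc.contains v
  | none => true

-- goB ignores unmapped elements: pre-filtering them away changes nothing
theorem goB_filter_none : ∀ (n : Nat) (l : List String) (acc : List String), l.length ≤ n →
    goB acc (l.filter (fun y => legacyMapping.get? y ≠ none)) = goB acc l := by
  intro n
  induction n with
  | zero =>
    intro l acc hl
    have : l = [] := List.eq_nil_of_length_eq_zero (Nat.le_zero.mp hl)
    subst this; rfl
  | succ n ih =>
    intro l acc hl
    cases l with
    | nil => rfl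
    | cons x xs =>
      cases h : legacyMapping.get? x with
      | none =>
        simp only [List.filter_cons, h]
        simp [goB, h]
      | some m =>
        simp only [List.filter_cons, h]
        simp only [ne_eq, reduceCtorEq, not_false_eq_true, decide_true, if_true]
        rw [goB, goB]
        simp only [h]
        rw [List.filter_comm]
        exact ih (xs.filter (fun y => decide (legacyMapping.get? y ≠ some m))) (acc ++ [m])
          (le_trans (List.length_filter_le _ _) (Nat.le_of_succ_le_succ hl))

-- main invariant: A's fold from acc equals B's loop run on the still-new elements
theorem foldA_eq_goB : ∀ (xs : List String) (acc : List String),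
    xs.foldl normLoopA acc = goB acc (xs.filter (keepB acc)) := by
  intro xs
  induction xs with
  | nil => intro acc; simp [goB]
  | cons x xs ih =>
    intro acc
    rw [List.foldl_cons]
    cases h : legacyMapping.get? x with
    | none =>
      have hstep : normLoopA acc x = acc := by simp [normLoopA, h]
      have hk : keepB acc x = true := by simp [keepB, h]
      simp only [List.filter_cons, hk, if_true]
      rw [goB]
      simp only [h]
      rw [goB_filter_none (xs.filter (keepB acc)).length _ acc le_rfl, hstep, ih]
    | some m =>
      by_cases hmem : m ∈ acc
      · have hstep : normLoopA acc x = acc := by simp [normLoopA, h, hmem]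
        have hk : keepB acc x = false := by
          simp [keepB, h, List.contains_eq_mem, hmem]
        rw [hstep, ih]
        simp [hk]
      · have hme : m ≠ "" := fun he => legacyMapping_get?_ne_some_empty x (he ▸ h)
        have hstep : normLoopA acc x = acc ++ [m] := by
          simp [normLoopA, h, hme, hmem]
        have hk : keepB acc x = true := by
          simp [keepB, h, List.contains_eq_mem, hmem]
        rw [hstep, ih]
        simp only [List.filter_cons, hk, if_true]
        rw [goB]
        simp only [h]
        rw [List.filter_filter]
        congr 1
        apply List.filter_congr
        intro y _
        cases hy : legacyMapping.get? y with
        | none => simp [keepB, hy]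
        | some w =>
          simp [keepB, hy, List.contains_eq_mem]
          exact Bool.and_comm _ _
-- ===== VERDICT (by name: the statement is the Claim_ definition above) =====
theorem normalize_legacy_action_types_py_spec : Claim_equal_normalize_legacy_action_types_py := by
  intro value _
  unfold Spec_normalize_legacy_action_types_py
  unfold normalize_legacy_action_types_py normalize_legacy_action_types_py_alt
  have hfilt : value.filter (keepB []) = value := by
    apply List.filter_eq_self.mpr
    intro y _
    cases hy : legacyMapping.get? y <;> simp [keepB, hy]
  rw [foldA_eq_goB value [], hfilt]
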